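-- pv_equiv track=rewrite | github.com/thealper2/codewars-solutions | 7-kyu/numbers_with_this_digit_inside.py | numbers_with_digit_inside
-- ===== SOURCE A (Python) =====
-- def numbers_with_digit_inside(x, d):
--     d = str(d)
--     matching_numbers = [num for num in range(1, x + 1) if d in str(num)]
--
--     if not matching_numbers:
--         return [0, 0, 0]
--
--     count = len(matching_numbers)
--     total_sum = sum(matching_numbers)
--     product = 1
--     for num in matching_numbers:
--         product *= num
--
--     return [count, total_sum, product]
-- ===== SOURCE B (Python) =====
-- def numbers_with_digit_inside(x, d):
--     ds = str(d)
--
--     def stats(lo, hi):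
--         # (count, sum, product) of numbers in [lo, hi] whose decimal string contains ds
--         if lo > hi:
--             return (0, 0, 1)
--         if lo == hi:
--             return (1, lo, lo) if ds in str(lo) else (0, 0, 1)
--         mid = (lo + hi) // 2
--         c1, s1, p1 = stats(lo, mid)
--         c2, s2, p2 = stats(mid + 1, hi)
--         return (c1 + c2, s1 + s2, p1 * p2)
--
--     c, s, p = stats(1, x)
--     return [c, s, p] if c else [0, 0, 0]
-- ===== Notes on version B (the rewrite author's own statement) =====
-- stated objective: alternative
-- what changed: Replaces A's filter-into-a-list plus three separate passes (len, sum, product loop) by a divide-and-conquer recursion that splits [1, x] at the midpoint and combines (count, sum, product) of the two halves; combining works because count/sum/product are associative-commutative monoid aggregations.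
import Mathlib
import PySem

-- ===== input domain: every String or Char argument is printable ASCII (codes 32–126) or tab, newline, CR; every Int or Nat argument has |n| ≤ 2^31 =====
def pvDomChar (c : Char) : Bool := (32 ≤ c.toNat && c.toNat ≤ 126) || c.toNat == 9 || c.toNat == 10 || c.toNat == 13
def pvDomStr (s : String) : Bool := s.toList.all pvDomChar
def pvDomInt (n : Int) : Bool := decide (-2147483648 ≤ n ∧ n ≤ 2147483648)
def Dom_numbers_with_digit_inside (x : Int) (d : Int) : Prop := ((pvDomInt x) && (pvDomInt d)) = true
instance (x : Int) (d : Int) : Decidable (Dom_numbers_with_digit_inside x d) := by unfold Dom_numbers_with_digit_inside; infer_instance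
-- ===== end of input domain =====

-- B replaces A's filter-into-a-list + three passes (len/sum/product loop) by a divide-and-conquer
-- recursion splitting [1, x] at the midpoint and combining (count, sum, product) of the halves.

-- ===== PORT A =====
def numbers_with_digit_inside (x : Int) (d : Int) : List Int :=
  let ds := PySem.Int.toStr d
  let matching_numbers :=
    (PySem.List.pyRange 1 (x + 1) 1).filter
      (fun num => PySem.Str.isIn ds (PySem.Int.toStr num))
  if matching_numbers = [] then [0, 0, 0]
  else
    let count : Int := matching_numbers.length
    let total_sum : Int := matching_numbers.sum
    let product : Int := matching_numbers.foldl (fun p num => p * num) 1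
    [count, total_sum, product]

-- ===== PORT B =====
-- midpoint bounds for the recursion's termination (cited in decreasing_by)
theorem nwdi_mid_bounds {lo hi : Int} (h : lo < hi) :
    lo ≤ PySem.Int.floordiv (lo + hi) 2 ∧ PySem.Int.floordiv (lo + hi) 2 < hi := by
  constructor
  · rw [PySem.Int.le_floordiv_iff_mul_le (by omega)]; omega
  · rw [PySem.Int.floordiv_lt_iff_lt_mul (by omega)]; omega

-- (count, sum, product) of the numbers in [lo, hi] whose decimal string contains ds
def nwdiStats (ds : String) (lo hi : Int) : Int × Int × Int :=
  if _h1 : hi < lo then (0, 0, 1)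
  else if _h2 : lo = hi then
    (if PySem.Str.isIn ds (PySem.Int.toStr lo) then (1, lo, lo) else (0, 0, 1))
  else
    let mid := PySem.Int.floordiv (lo + hi) 2
    let l := nwdiStats ds lo mid
    let r := nwdiStats ds (mid + 1) hi
    (l.1 + r.1, l.2.1 + r.2.1, l.2.2 * r.2.2)
termination_by (hi - lo).toNat
decreasing_by
  · have := nwdi_mid_bounds (lo := lo) (hi := hi) (by omega)
    omega
  · have := nwdi_mid_bounds (lo := lo) (hi := hi) (by omega)
    omega

def numbers_with_digit_inside_alt (x : Int) (d : Int) : List Int :=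
  let ds := PySem.Int.toStr d
  let acc := nwdiStats ds 1 x
  if acc.1 ≠ 0 then [acc.1, acc.2.1, acc.2.2] else [0, 0, 0]

-- ===== PRECONDITION & SPEC =====
def Spec_numbers_with_digit_inside (x : Int) (d : Int) (out : List Int) : Prop := out = numbers_with_digit_inside_alt x d
instance (x : Int) (d : Int) (out : List Int) : Decidable (Spec_numbers_with_digit_inside x d out) := by unfold Spec_numbers_with_digit_inside; infer_instance

-- ===== CLAIM (what is proved, stated in full; the proofs are below) =====
def Claim_equal_numbers_with_digit_inside : Prop := ∀ (x : Int) (d : Int), Dom_numbers_with_digit_inside x d → Spec_numbers_with_digit_inside x d (numbers_with_digit_inside x d)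

-- ===== LEMMAS AND PROOFS =====

-- the divide-and-conquer recursion computes (length, sum, product-fold) of the filtered range
theorem nwdiStats_eq (ds : String) (lo hi : Int) :
    nwdiStats ds lo hi =
      (let m := (PySem.List.pyRange lo (hi + 1) 1).filter
          (fun num => PySem.Str.isIn ds (PySem.Int.toStr num))
       ((m.length : Int), m.sum, m.foldl (fun p num => p * num) 1)) := by
  generalize hk : (hi - lo).toNat = k
  induction k using Nat.strong_induction_on generalizing lo hi with
  | _ k ih =>
    rw [nwdiStats]
    by_cases h1 : hi < lo
    · rw [PySem.List.pyRange_one_eq_nil (by omega)]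
      simp [h1]
    · by_cases h2 : lo = hi
      · subst h2
        rw [PySem.List.pyRange_one_singleton]
        cases hq : PySem.Chars.isIn ds.toList (PySem.Int.toChars lo) <;>
          simp [List.filter, hq]
      · have hlt : lo < hi := by omega
        have hm := nwdi_mid_bounds hlt
        set mid := PySem.Int.floordiv (lo + hi) 2 with hmid
        have hsplit : PySem.List.pyRange lo (hi + 1) 1 =
            PySem.List.pyRange lo (mid + 1) 1 ++ PySem.List.pyRange (mid + 1) (hi + 1) 1 :=
          PySem.List.pyRange_one_append lo (mid + 1) (hi + 1) (by omega) (by omega)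
        have ihl := ih (mid - lo).toNat (by omega) lo mid rfl
        have ihr := ih (hi - (mid + 1)).toNat (by omega) (mid + 1) hi rfl
        simp only [h1, h2, dite_false, ihl, ihr, hsplit, List.filter_append]
        simp only [List.length_append, List.sum_append, List.foldl_append]
        refine Prod.ext (by push_cast; ring) (Prod.ext (by ring) ?_)
        -- product of a concatenation: re-express both foldl-products via List.prod
        simp only []
        have hp : ∀ (l : List Int) (a : Int),
            l.foldl (fun p num => p * num) a = a * l.prod := by
          intro l
          induction l with
          | nil => simp
          | cons y t iht => intro a; simp [List.foldl_cons, iht, List.prod_cons]; ring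
        simp [hp]

-- ===== VERDICT (by name: the statement is the Claim_ definition above) =====
theorem numbers_with_digit_inside_spec : Claim_equal_numbers_with_digit_inside := by
  intro x d _
  unfold Spec_numbers_with_digit_inside numbers_with_digit_inside numbers_with_digit_inside_alt
  simp only [nwdiStats_eq]
  set m := (PySem.List.pyRange 1 (x + 1) 1).filter
      (fun num => PySem.Str.isIn (PySem.Int.toStr d) (PySem.Int.toStr num)) with hm
  by_cases hnil : m = []
  · simp [hnil]
  · simp [hnil]
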